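-- pv_equiv track=rewrite | github.com/diogobontempo88/Project-Restaurant-Orders | restaurant-orders/src/analyze_log.py | never_visited_days_per_customer
-- ===== SOURCE A (Python) =====
-- def never_visited_days_per_customer(orders, customer):
--     total_meals = []
--     for base in orders:
--         total_meals.append(base["dia"])
--
--     customer_meals = []
--     for base in orders:
--         if base["cliente"] == customer:
--             customer_meals.append(base["dia"])
--
--     set_total = set(total_meals)
--     set_customer = set(customer_meals)
--
--     return set_total - set_customer
-- ===== SOURCE B (Python) =====
-- def never_visited_days_per_customer(orders, customer):
--     by_day = {}
--     for base in orders: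
--         by_day.setdefault(base["dia"], set()).add(base["cliente"])
--     return {day for day in by_day if customer not in by_day[day]}
-- ===== Notes on version B (the rewrite author's own statement) =====
-- stated objective: alternative
-- what changed: Replaces A's two flat list passes plus set difference with a single grouping pass building a day-to-customer-set index, then a filter of that index by membership of the customer.
import Mathlib
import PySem

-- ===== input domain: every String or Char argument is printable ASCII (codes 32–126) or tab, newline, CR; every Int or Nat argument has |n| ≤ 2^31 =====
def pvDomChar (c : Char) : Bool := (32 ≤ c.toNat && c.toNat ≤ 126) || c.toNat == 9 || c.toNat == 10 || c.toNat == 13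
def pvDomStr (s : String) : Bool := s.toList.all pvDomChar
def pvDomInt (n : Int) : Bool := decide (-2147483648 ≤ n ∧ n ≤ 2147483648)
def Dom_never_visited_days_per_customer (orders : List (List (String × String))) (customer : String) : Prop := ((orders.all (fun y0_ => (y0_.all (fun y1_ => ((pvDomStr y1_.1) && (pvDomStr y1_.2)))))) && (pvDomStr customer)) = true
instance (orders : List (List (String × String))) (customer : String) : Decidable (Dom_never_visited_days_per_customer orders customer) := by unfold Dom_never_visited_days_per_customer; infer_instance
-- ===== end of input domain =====

-- B groups orders into a day→customer-set index in one pass and filters it by membership,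
-- instead of A's two flat day-list passes combined by set difference (objective: alternative).

-- ===== PORT A =====
-- base[k] for an order dict; `none` (Python KeyError) is excluded by Pre_, the default "" is never reached there
def pvItem (base : List (String × String)) (k : String) : String :=
  ((PySem.Dict.mk base).get? k).getD ""

def never_visited_days_per_customer (orders : List (List (String × String))) (customer : String) : List String :=
  let total_meals := orders.foldl (fun acc base => acc ++ [pvItem base "dia"]) []
  let customer_meals := orders.foldl (fun acc base =>
      if pvItem base "cliente" == customer then acc ++ [pvItem base "dia"] else acc) []
  let set_total := PySem.Set.ofList total_meals
  let set_customer := PySem.Set.ofList customer_meals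
  PySem.Set.diff set_total set_customer

-- ===== PORT B =====
def pvGroupStep (customerSets : PySem.Dict String (PySem.Set String)) (base : List (String × String)) :
    PySem.Dict String (PySem.Set String) :=
  customerSets.modify (pvItem base "dia") PySem.Set.empty (fun s => PySem.Set.add s (pvItem base "cliente"))

def never_visited_days_per_customer_alt (orders : List (List (String × String))) (customer : String) : List String :=
  let by_day := orders.foldl pvGroupStep PySem.Dict.empty
  PySem.Set.ofList (by_day.keys.filter
    (fun day => !(PySem.Set.contains (by_day.getD day PySem.Set.empty) customer)))

-- ===== PRECONDITION & SPEC =====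
-- Pre_ excludes exactly the orders missing a "dia" or "cliente" key: there Python A raises KeyError.
def Pre_never_visited_days_per_customer (orders : List (List (String × String))) (customer : String) : Prop :=
  ∀ base ∈ orders, "dia" ∈ base.map Prod.fst ∧ "cliente" ∈ base.map Prod.fst
instance (orders : List (List (String × String))) (customer : String) : Decidable (Pre_never_visited_days_per_customer orders customer) := by unfold Pre_never_visited_days_per_customer; infer_instance

def pvWitness_never_visited_days_per_customer : (List (List (String × String))) × String :=
  ([[("dia", "mon"), ("cliente", "ana")], [("dia", "tue"), ("cliente", "bob")]], "ana")

def Spec_never_visited_days_per_customer (orders : List (List (String × String))) (customer : String) (out : List String) : Prop := out = never_visited_days_per_customer_alt orders customer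
instance (orders : List (List (String × String))) (customer : String) (out : List String) : Decidable (Spec_never_visited_days_per_customer orders customer out) := by unfold Spec_never_visited_days_per_customer; infer_instance

-- ===== CLAIM (what is proved, stated in full; the proofs are below) =====
def Claim_equal_never_visited_days_per_customer : Prop := ∀ (orders : List (List (String × String))) (customer : String), Dom_never_visited_days_per_customer orders customer → Pre_never_visited_days_per_customer orders customer → Spec_never_visited_days_per_customer orders customer (never_visited_days_per_customer orders customer)

-- ===== LEMMAS AND PROOFS =====

-- one grouping step only adds the order's day to the key list
theorem pvKeys_groupStep (d : PySem.Dict String (PySem.Set String)) (base : List (String × String)) :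
    (pvGroupStep d base).keys = PySem.Set.add d.keys (pvItem base "dia") := by
  rw [pvGroupStep, PySem.Dict.keys_modify]
  by_cases h : pvItem base "dia" ∈ d.keys
  · rw [PySem.Dict.keys_insert_of_contains _ _ ((PySem.Dict.contains_iff_mem_keys _ _).mpr h),
      PySem.Set.add_of_mem h]
  · rw [PySem.Dict.keys_insert_of_not_contains _ _ (by
      simp only [← Bool.not_eq_true, PySem.Dict.contains_iff_mem_keys]; exact h),
      PySem.Set.add_of_not_mem h]

-- the keys of the grouped index are the distinct days, in first-occurrence order
theorem pvKeys_group (orders : List (List (String × String))) (d : PySem.Dict String (PySem.Set String)) :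
    (orders.foldl pvGroupStep d).keys
      = (orders.map (fun b => pvItem b "dia")).foldl PySem.Set.add d.keys := by
  induction orders generalizing d with
  | nil => rfl
  | cons b os ih => simp only [List.foldl_cons, List.map_cons, ih, pvKeys_groupStep]

-- the grouped index records exactly the (day, customer) pairs of the processed orders
theorem pvContains_group (orders : List (List (String × String))) (customer day : String)
    (d : PySem.Dict String (PySem.Set String)) :
    (customer ∈ (orders.foldl pvGroupStep d).getD day PySem.Set.empty)
      ↔ (customer ∈ d.getD day PySem.Set.empty
          ∨ ∃ b ∈ orders, pvItem b "dia" = day ∧ pvItem b "cliente" = customer) := by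
  induction orders generalizing d with
  | nil => simp
  | cons b os ih =>
    simp only [List.foldl_cons, ih, List.mem_cons]
    have hstep : (pvGroupStep d b).getD day PySem.Set.empty
        = if day = pvItem b "dia"
          then PySem.Set.add (d.getD (pvItem b "dia") PySem.Set.empty) (pvItem b "cliente")
          else d.getD day PySem.Set.empty := PySem.Dict.getD_modify _ _ _ _ _
    rw [hstep]
    by_cases hd : day = pvItem b "dia"
    · subst hd
      rw [if_pos rfl]
      simp only [PySem.Set.mem_add]
      constructor
      · rintro (h | h)
        · rcases h with h | h
          · exact Or.inl h
          · exact Or.inr ⟨b, Or.inl rfl, rfl, h.symm⟩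
        · rcases h with ⟨b', hb', hb'd, hb'c⟩
          exact Or.inr ⟨b', Or.inr hb', hb'd, hb'c⟩
      · rintro (h | ⟨b', hb', hb'd, hb'c⟩)
        · exact Or.inl (Or.inl h)
        · rcases hb' with rfl | hb'
          · exact Or.inl (Or.inr hb'c.symm)
          · exact Or.inr ⟨b', hb', hb'd, hb'c⟩
    · rw [if_neg hd]
      constructor
      · rintro (h | ⟨b', hb', hb'd, hb'c⟩)
        · exact Or.inl h
        · exact Or.inr ⟨b', Or.inr hb', hb'd, hb'c⟩
      · rintro (h | ⟨b', hb', hb'd, hb'c⟩)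
        · exact Or.inl h
        · rcases hb' with rfl | hb'
          · exact absurd hb'd.symm hd
          · exact Or.inr ⟨b', hb', hb'd, hb'c⟩

-- ===== VERDICT (by name: the statement is the Claim_ definition above) =====
theorem never_visited_days_per_customer_spec : Claim_equal_never_visited_days_per_customer := by
  intro orders customer _ _
  unfold Spec_never_visited_days_per_customer
  unfold never_visited_days_per_customer never_visited_days_per_customer_alt
  simp only [PySem.List.foldl_append_singleton_eq_map, PySem.List.foldl_append_if,
    List.nil_append]
  set G := orders.foldl pvGroupStep PySem.Dict.empty with hG
  have hkeys : G.keys = PySem.Set.ofList (orders.map (fun b => pvItem b "dia")) := by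
    rw [hG, pvKeys_group, PySem.Set.ofList_eq_foldl]
    rfl
  rw [hkeys, PySem.Set.diff]
  have hnodup : (PySem.Set.ofList (orders.map (fun b => pvItem b "dia"))).Nodup :=
    PySem.Set.nodup_ofList _
  rw [PySem.Set.ofList_eq_self_of_nodup _
    (List.Nodup.filter (fun day => !(PySem.Set.contains (G.getD day PySem.Set.empty) customer)) hnodup)]
  apply List.filter_congr
  intro day _
  have hmemC : (PySem.Set.contains
      (PySem.Set.ofList (List.map (fun b => pvItem b "dia")
        (List.filter (fun base => pvItem base "cliente" == customer) orders))) day)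
      = (PySem.Set.contains (G.getD day PySem.Set.empty) customer) := by
    rw [Bool.eq_iff_iff, PySem.Set.contains_iff, PySem.Set.contains_iff, hG,
      pvContains_group, PySem.Set.mem_ofList, List.mem_map]
    constructor
    · rintro ⟨b, hb, hbd⟩
      rw [List.mem_filter, beq_iff_eq] at hb
      exact Or.inr ⟨b, hb.1, hbd, hb.2⟩
    · rintro (h | ⟨b, hb, hbd, hbc⟩)
      · simp at h
      · exact ⟨b, List.mem_filter.mpr ⟨hb, beq_iff_eq.mpr hbc⟩, hbd⟩
  rw [hmemC]
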